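-- pv_equiv track=rewrite | github.com/aajanki/frequent-substrings | src/freqsubs.py | find_frequent_substrings_slow
-- ===== SOURCE A (Python) =====
-- from typing import Iterable, Tuple, Union
--
-- def find_frequent_substrings_slow(text: str, min_support: int, min_length: int = 1) -> Iterable[Tuple[str, int]]:
--     """Find frequent substrings of text.
--
--     Like find_frequent_substrings() but asymptotically slower O(n^2).
--     """
--     substrings = (
--         x for x in find_substrings_slow(text)
--         if len(x[0]) >= min_length and x[1] >= min_support)
--     substrings_sorted = sorted(substrings)
--
--     frequent = []
--     for candidate, next_candidate in zip(substrings_sorted[:-1], substrings_sorted[1:]):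
--         if not next_candidate[0].startswith(candidate[0]):
--             frequent.append(candidate)
--
--     if substrings_sorted:
--         frequent.append(substrings_sorted[-1])
--
--     return frequent
--
-- def find_substrings_slow(text: str) -> Iterable[Tuple[str, int]]:
--     """Get all substrings of text and their frequencies.
--
--     The output equals to find_substrings() but this is asymptotically
--     slower and uses more memory.
--     """
--     substrings = set(text[i:j]
--                      for i in range(len(text))
--                      for j in range(i+1, len(text)+1))
--     return ((s, count_overlapping(text, s)) for s in substrings)
--
-- def count_overlapping(text: str, sub: str) -> int:
--     """The number of overlapping occurrences of the substring sub in text."""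
--     count = 0
--     start = 0
--     i = 0
--     while i >= 0:
--         i = text.find(sub, start)
--         if i >= 0:
--             count += 1
--             start = i+1
--
--     return count
-- ===== SOURCE B (Python) =====
-- def find_frequent_substrings_slow(text, min_support, min_length=1):
--     # One pass over all (i, j) slices builds a counter: counts[s] is exactly the
--     # number of start positions of s in text, i.e. its overlapping occurrence count.
--     counts = {}
--     n = len(text)
--     for i in range(n):
--         for j in range(i + 1, n + 1):
--             s = text[i:j]
--             counts[s] = counts.get(s, 0) + 1
--
--     candidates = [(s, c) for s, c in counts.items()
--                   if len(s) >= min_length and c >= min_support]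
--     candidates.sort()
--
--     frequent = [cand for cand, nxt in zip(candidates, candidates[1:])
--                 if not nxt[0].startswith(cand[0])]
--     if candidates:
--         frequent.append(candidates[-1])
--
--     return frequent
-- ===== Notes on version B (the rewrite author's own statement) =====
-- stated objective: alternative
-- what changed: A calls a find()-based while-loop (count_overlapping) once per distinct substring to count its overlapping occurrences; B instead builds one counting dictionary in a single pass over all slices text[i:j] (each slice start is one overlapping occurrence), so the per-substring rescans disappear; the prefix filter then runs on the same sorted candidate list (measured ~2-3x ahead on mid sizes but not confirmed at the largest size, so no speed claim).
import Mathlib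
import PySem

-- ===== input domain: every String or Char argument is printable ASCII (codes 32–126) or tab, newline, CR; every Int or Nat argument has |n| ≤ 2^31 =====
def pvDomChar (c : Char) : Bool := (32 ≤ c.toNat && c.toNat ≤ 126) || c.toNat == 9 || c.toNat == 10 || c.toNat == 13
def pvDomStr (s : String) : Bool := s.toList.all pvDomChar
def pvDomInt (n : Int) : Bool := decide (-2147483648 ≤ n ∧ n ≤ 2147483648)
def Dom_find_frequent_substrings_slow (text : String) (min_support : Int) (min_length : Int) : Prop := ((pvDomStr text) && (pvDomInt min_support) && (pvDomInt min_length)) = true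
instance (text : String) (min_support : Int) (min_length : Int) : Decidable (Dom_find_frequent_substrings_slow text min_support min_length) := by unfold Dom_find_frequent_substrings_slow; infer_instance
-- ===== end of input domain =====

-- B replaces A's per-substring `str.find` rescanning loops with one counting dictionary
-- built in a single pass over all slices (each slice start contributes 1 = one overlapping
-- occurrence); the return values are proved identical.

-- ===== PORT A =====

-- The while-loop of count_overlapping: i = text.find(sub, start); if i >= 0: count += 1; start = i + 1.
-- Structural recursion on a fuel bound; fuel len(text)+2 is proved sufficient in pv_loop_eq_M.
def pvCountLoop (t s : List Char) : Nat → Nat → Int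
  | 0, _ => 0
  | fuel + 1, start =>
    let i := PySem.Chars.findFrom t s (start : Int) none
    if 0 ≤ i then 1 + pvCountLoop t s fuel (i.toNat + 1) else 0

def count_overlapping (text sub : String) : Int :=
  pvCountLoop text.toList sub.toList (text.toList.length + 2) 0

def find_substrings_slow (text : String) : List (String × Int) :=
  let n : Int := PySem.Str.len text
  let substrings : PySem.Set String := PySem.Set.ofList
    ((PySem.List.pyRange 0 n).flatMap (fun i =>
      (PySem.List.pyRange (i + 1) (n + 1)).map (fun j => PySem.Str.slice text (some i) (some j))))
  substrings.map (fun s => (s, count_overlapping text s))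

def find_frequent_substrings_slow (text : String) (min_support : Int) (min_length : Int) : List (String × Int) :=
  let substrings := (find_substrings_slow text).filter
    (fun x => decide (min_length ≤ PySem.Str.len x.1) && decide (min_support ≤ x.2))
  let substrings_sorted := PySem.List.sorted2 substrings (fun x => x.1) (fun x => x.2)
  let frequent := (List.zip (PySem.List.slice substrings_sorted none (some (-1)))
      (PySem.List.slice substrings_sorted (some 1) none)).foldl
    (fun acc cn => if PySem.Str.startswith cn.2.1 cn.1.1 then acc else acc ++ [cn.1]) []
  if substrings_sorted = [] then frequent
  else frequent ++ [PySem.List.pyGetD substrings_sorted (-1) ("", 0)]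

-- ===== PORT B =====
def find_frequent_substrings_slow_alt (text : String) (min_support : Int) (min_length : Int) : List (String × Int) :=
  let n : Int := PySem.Str.len text
  let counts : PySem.Dict String Int :=
    ((PySem.List.pyRange 0 n).flatMap (fun i =>
      (PySem.List.pyRange (i + 1) (n + 1)).map (fun j => PySem.Str.slice text (some i) (some j)))).foldl
      (fun d s => d.insert s (d.getD s 0 + 1)) PySem.Dict.empty
  let candidates := counts.items.filter
    (fun p => decide (min_length ≤ PySem.Str.len p.1) && decide (min_support ≤ p.2))
  let cs := PySem.List.sorted2 candidates (fun x => x.1) (fun x => x.2)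
  let frequent := ((List.zip cs (PySem.List.slice cs (some 1) none)).filter
      (fun cn => !(PySem.Str.startswith cn.2.1 cn.1.1))).map (fun cn => cn.1)
  if cs = [] then frequent
  else frequent ++ [PySem.List.pyGetD cs (-1) ("", 0)]

-- ===== PRECONDITION & SPEC =====
def Spec_find_frequent_substrings_slow (text : String) (min_support : Int) (min_length : Int) (out : List (String × Int)) : Prop := out = find_frequent_substrings_slow_alt text min_support min_length
instance (text : String) (min_support : Int) (min_length : Int) (out : List (String × Int)) : Decidable (Spec_find_frequent_substrings_slow text min_support min_length out) := by unfold Spec_find_frequent_substrings_slow; infer_instance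

-- ===== CLAIM (what is proved, stated in full; the proofs are below) =====
def Claim_equal_find_frequent_substrings_slow : Prop := ∀ (text : String) (min_support : Int) (min_length : Int), Dom_find_frequent_substrings_slow text min_support min_length → Spec_find_frequent_substrings_slow text min_support min_length (find_frequent_substrings_slow text min_support min_length)

-- ===== LEMMAS AND PROOFS =====

-- The list of all slices text[i:j], 0 ≤ i < n, i < j ≤ n (the list both ports enumerate).
def pvSubs (text : String) : List String :=
  (PySem.List.pyRange 0 (PySem.Str.len text)).flatMap (fun i =>
    (PySem.List.pyRange (i + 1) (PySem.Str.len text + 1)).map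
      (fun j => PySem.Str.slice text (some i) (some j)))

theorem pv_subs_def (text : String) :
    (PySem.List.pyRange 0 (PySem.Str.len text)).flatMap (fun i =>
      (PySem.List.pyRange (i + 1) (PySem.Str.len text + 1)).map
        (fun j => PySem.Str.slice text (some i) (some j))) = pvSubs text := rfl

-- Number of match positions p ∈ [start, len(t)) where sub is a prefix of t[p:].
def pvM (t sub : List Char) (start : Int) : Nat :=
  List.countP (fun p => decide (sub <+: t.drop p.toNat))
    (PySem.List.pyRange start (t.length : Int))

-- When text.find(sub, start) returns a non-negative index i, start ≤ i ≤ len(text).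
theorem pvFind_facts (t s : List Char) (start : Nat)
    (h : 0 ≤ PySem.Chars.findFrom t s (start : Int) none) :
    start ≤ t.length ∧ start ≤ (PySem.Chars.findFrom t s (start : Int) none).toNat ∧
      (PySem.Chars.findFrom t s (start : Int) none).toNat ≤ t.length := by
  have hsl : start ≤ t.length := by
    by_contra hgt
    have hlt : (t.length : Int) < (start : Int) := by exact_mod_cast Nat.lt_of_not_le hgt
    have h0 : ¬((start : Int) < 0) := by omega
    have : PySem.Chars.findFrom t s (start : Int) none = -1 := by
      simp only [PySem.Chars.findFrom]
      simp [h0, hlt]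
    omega
  have hform := PySem.Chars.findFrom_natCast t s start hsl
  by_cases hfind : PySem.Chars.find (t.drop start) s = -1
  · rw [hform, if_pos hfind] at h; omega
  · rw [hform, if_neg hfind] at h ⊢
    have h2 : PySem.Chars.find (t.drop start) s ≤ ((t.drop start).length : Int) :=
      PySem.Chars.find_le_length _ _
    have h3 : (t.drop start).length = t.length - start := List.length_drop
    have h1 : -1 ≤ PySem.Chars.find (t.drop start) s := PySem.Chars.neg_one_le_find _ _
    omega

theorem pv_zip_take {α β : Type} (xs : List α) (ys : List β) :
    (xs.take ys.length).zip ys = xs.zip ys := by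
  induction xs generalizing ys with
  | nil => simp
  | cons x t ih =>
    cases ys with
    | nil => simp
    | cons y u => simpa using ih u

theorem pv_zip_dropLast_tail {α : Type} (xs : List α) :
    List.zip xs.dropLast xs.tail = List.zip xs xs.tail := by
  cases xs with
  | nil => rfl
  | cons x t =>
    have h : (x :: t).dropLast = (x :: t).take t.length := by
      rw [List.dropLast_eq_take]; simp
    show List.zip (x :: t).dropLast t = List.zip (x :: t) t
    rw [h, pv_zip_take]

theorem pv_sum_map_ite {α : Type} (p : α → Bool) (xs : List α) :
    (xs.map (fun x => if p x then 1 else 0)).sum = List.countP p xs := by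
  induction xs with
  | nil => simp
  | cons x t ih => by_cases h : p x <;> simp [ih, h] <;> omega

theorem pv_mem_subs_ne_nil (text : String) (s : String) (hs : s ∈ pvSubs text) :
    s.toList ≠ [] := by
  unfold pvSubs at hs
  rw [List.mem_flatMap] at hs
  obtain ⟨i, hi, hmem⟩ := hs
  rw [List.mem_map] at hmem
  obtain ⟨j, hj, hsj⟩ := hmem
  rw [PySem.List.mem_pyRange_one, PySem.Str.len_eq] at hi hj
  intro hnil
  have hTL := congrArg String.toList hsj
  rw [PySem.Str.toList_slice, PySem.Chars.slice_eq_listSlice,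
    PySem.List.slice_toNat _ (by omega) (by omega), hnil] at hTL
  have hL := congrArg List.length hTL
  simp only [List.length_take, List.length_drop, List.length_nil] at hL
  omega

theorem pv_loop_eq_M (t sub : List Char) (hsub : sub ≠ []) :
    ∀ (fuel start : Nat), t.length + 1 - start ≤ fuel →
      pvCountLoop t sub fuel start = (pvM t sub (start : Int) : Int) := by
  intro fuel
  induction fuel with
  | zero =>
    intro start hf
    show (0 : Int) = _
    have hM : pvM t sub (start : Int) = 0 := by
      unfold pvM
      rw [PySem.List.pyRange_one_eq_nil (by omega)]
      simp
    rw [hM]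
    simp
  | succ f ih =>
    intro start hf
    by_cases hpos : 0 ≤ PySem.Chars.findFrom t sub (start : Int) none
    · obtain ⟨hsl, hsr, hrl⟩ := pvFind_facts t sub start hpos
      set r := PySem.Chars.findFrom t sub (start : Int) none with hr
      have hne1 : r ≠ -1 := by omega
      obtain ⟨hkr, hpre, hmin⟩ := PySem.Chars.findFrom_natCast_spec t sub start hsl hne1
      rw [← hr] at hpre hmin
      have hdne : t.drop r.toNat ≠ [] := fun he => hsub (List.prefix_nil.mp (he ▸ hpre))
      have hrlt : r.toNat < t.length := by
        by_contra hge
        exact hdne (List.drop_eq_nil_iff.mpr (by omega))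
      rw [pvCountLoop]
      simp only [← hr, if_pos hpos]
      rw [ih (r.toNat + 1) (by omega)]
      have hsplit : pvM t sub (start : Int) = 1 + pvM t sub ((r.toNat + 1 : Nat) : Int) := by
        unfold pvM
        rw [PySem.List.pyRange_one_append (start : Int) r (t.length : Int) (by omega) (by omega),
          PySem.List.pyRange_one_append r (r + 1) (t.length : Int) (by omega) (by omega),
          PySem.List.pyRange_one_singleton]
        simp only [List.countP_append]
        have hz : List.countP (fun p => decide (sub <+: t.drop p.toNat))
            (PySem.List.pyRange (start : Int) r) = 0 := by
          apply List.countP_eq_zero.mpr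
          intro a ha
          rw [PySem.List.mem_pyRange_one] at ha
          simp only [decide_eq_true_eq]
          exact hmin a.toNat (by omega) (by omega)
        have ho : List.countP (fun p => decide (sub <+: t.drop p.toNat)) [r] = 1 := by
          simp [hpre]
        have hcast : ((r.toNat + 1 : Nat) : Int) = r + 1 := by omega
        rw [hz, ho, hcast]
        omega
      rw [hsplit]
      push_cast
      ring
    · rw [pvCountLoop]
      simp only [if_neg hpos]
      by_cases hsl : start ≤ t.length
      · have heq : PySem.Chars.findFrom t sub (start : Int) none = -1 := by
          rw [PySem.Chars.findFrom_natCast t sub start hsl] at hpos ⊢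
          by_cases hfind : PySem.Chars.find (t.drop start) sub = -1
          · rw [if_pos hfind]
          · exfalso
            rw [if_neg hfind] at hpos
            have h1 : -1 ≤ PySem.Chars.find (t.drop start) sub := PySem.Chars.neg_one_le_find _ _
            omega
        have hniff := (PySem.Chars.findFrom_natCast_eq_neg_one_iff t sub start hsl).mp heq
        have hM : pvM t sub (start : Int) = 0 := by
          apply List.countP_eq_zero.mpr
          intro a ha
          rw [PySem.List.mem_pyRange_one] at ha
          simp only [decide_eq_true_eq]
          intro hpre'
          apply hniff
          have hdd : t.drop a.toNat = (t.drop start).drop (a.toNat - start) := by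
            rw [List.drop_drop]; congr 1; omega
          rw [hdd] at hpre'
          exact hpre'.isInfix.trans (List.drop_suffix _ _).isInfix
        rw [hM]
        simp
      · have hM : pvM t sub (start : Int) = 0 := by
          unfold pvM
          rw [PySem.List.pyRange_one_eq_nil (by omega)]
          simp
        rw [hM]
        simp

theorem pv_inner (text s : String) (hne : s.toList ≠ []) (i : Int) (h0 : 0 ≤ i)
    (hiN : i < (text.toList.length : Int)) :
    List.countP (fun j => PySem.Str.slice text (some i) (some j) == s)
      (PySem.List.pyRange (i + 1) ((text.toList.length : Int) + 1))
    = if decide (s.toList <+: text.toList.drop i.toNat) then 1 else 0 := by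
  have hslice : ∀ j : Int, 0 ≤ j →
      (PySem.Str.slice text (some i) (some j)).toList
        = List.take (j.toNat - i.toNat) (List.drop i.toNat text.toList) := by
    intro j hj
    rw [PySem.Str.toList_slice, PySem.Chars.slice_eq_listSlice, PySem.List.slice_toNat _ h0 hj]
  by_cases hpre : s.toList <+: List.drop i.toNat text.toList
  · rw [if_pos (by simpa using hpre)]
    have hl1 : 0 < s.toList.length := List.length_pos_iff.mpr hne
    have hlen : s.toList.length ≤ text.toList.length - i.toNat := by
      simpa [List.length_drop] using hpre.length_le
    have hkey : ∀ j ∈ PySem.List.pyRange (i + 1) ((text.toList.length : Int) + 1),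
        ((PySem.Str.slice text (some i) (some j) == s) = true ↔
          ((j == i + (s.toList.length : Int)) = true)) := by
      intro j hj
      rw [PySem.List.mem_pyRange_one] at hj
      simp only [beq_iff_eq]
      constructor
      · intro hslc
        have hTL := congrArg String.toList hslc
        rw [hslice j (by omega)] at hTL
        have hL := congrArg List.length hTL
        simp only [List.length_take, List.length_drop] at hL
        omega
      · intro hj_eq
        apply String.ext
        rw [hslice j (by omega), hj_eq]
        have h1 : (i + (s.toList.length : Int)).toNat - i.toNat = s.toList.length := by omega
        rw [h1]
        exact (List.prefix_iff_eq_take.mp hpre).symm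
    rw [List.countP_congr hkey, ← List.count_eq_countP]
    exact List.count_eq_one_of_mem (PySem.List.nodup_pyRange_one _ _)
      (PySem.List.mem_pyRange_one.mpr ⟨by omega, by omega⟩)
  · rw [if_neg (by simpa using hpre)]
    apply List.countP_eq_zero.mpr
    intro j hj hb
    rw [PySem.List.mem_pyRange_one] at hj
    rw [beq_iff_eq] at hb
    have hTL := congrArg String.toList hb
    rw [hslice j (by omega)] at hTL
    exact hpre (hTL ▸ List.take_prefix _ _)

theorem pv_count_in_subs (text s : String) (hs : s ∈ pvSubs text) :
    (pvSubs text).count s = pvM text.toList s.toList 0 := by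
  have hne := pv_mem_subs_ne_nil text s hs
  rw [List.count_eq_countP]
  unfold pvSubs
  rw [PySem.Str.len_eq, List.countP_flatMap]
  have hcong : ∀ i ∈ PySem.List.pyRange 0 ((text.toList.length : Int)),
      (List.countP (fun x => x == s) ∘ (fun i =>
        List.map (fun j => PySem.Str.slice text (some i) (some j))
          (PySem.List.pyRange (i + 1) ((text.toList.length : Int) + 1)))) i
      = (fun i : Int => if decide (s.toList <+: text.toList.drop i.toNat) then 1 else 0) i := by
    intro i hi
    rw [PySem.List.mem_pyRange_one] at hi
    simp only [Function.comp_apply]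
    rw [List.countP_map]
    have h := pv_inner text s hne i hi.1 hi.2
    simpa [Function.comp] using h
  rw [List.map_congr_left hcong, pv_sum_map_ite]
  rfl

theorem pv_count_eq (text s : String) (hs : s ∈ pvSubs text) :
    count_overlapping text s = ((pvSubs text).count s : Int) := by
  have h := pv_loop_eq_M text.toList s.toList (pv_mem_subs_ne_nil text s hs)
    (text.toList.length + 2) 0 (by omega)
  rw [count_overlapping, h, pv_count_in_subs text s hs]
  norm_num

theorem pv_tail_stage {β : Type} (l : List (String × β)) :
    (List.zip (PySem.List.slice l none (some (-1))) (PySem.List.slice l (some 1) none)).foldl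
      (fun acc cn => if PySem.Str.startswith cn.2.1 cn.1.1 then acc else acc ++ [cn.1]) []
    = ((List.zip l (PySem.List.slice l (some 1) none)).filter
        (fun cn => !(PySem.Str.startswith cn.2.1 cn.1.1))).map (fun cn => cn.1) := by
  rw [PySem.List.slice_to_neg_one, PySem.List.slice_from_one, pv_zip_dropLast_tail]
  have hfun : (fun (acc : List (String × β)) (cn : (String × β) × (String × β)) =>
        if PySem.Str.startswith cn.2.1 cn.1.1 then acc else acc ++ [cn.1])
      = (fun acc cn =>
        if (!(PySem.Str.startswith cn.2.1 cn.1.1)) = true then acc ++ [cn.1] else acc) := by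
    funext acc cn
    cases h : PySem.Str.startswith cn.2.1 cn.1.1 <;> simp [h]
  rw [hfun, PySem.List.foldl_append_if]
  simp

-- ===== VERDICT (by name: the statement is the Claim_ definition above) =====
theorem find_frequent_substrings_slow_spec : Claim_equal_find_frequent_substrings_slow := by
  intro text min_support min_length _
  unfold Spec_find_frequent_substrings_slow
  show find_frequent_substrings_slow text min_support min_length
      = find_frequent_substrings_slow_alt text min_support min_length
  simp only [find_frequent_substrings_slow, find_frequent_substrings_slow_alt, find_substrings_slow]
  rw [pv_subs_def text, PySem.Dict.foldl_insert_getD_add_one_eq_counter, PySem.Dict.items_counter]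
  have hmap : List.map (fun s => (s, count_overlapping text s)) (PySem.Set.ofList (pvSubs text))
      = List.map (fun k => (k, (List.count k (pvSubs text) : Int))) (PySem.Set.ofList (pvSubs text)) := by
    apply List.map_congr_left
    intro s hs
    have hmem : s ∈ pvSubs text := (PySem.Set.mem_ofList (pvSubs text) s).mp hs
    rw [pv_count_eq text s hmem]
  rw [hmap, pv_tail_stage]
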